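-- pv_equiv track=rewrite | github.com/jmlv929/grokking_algorithms_study | Mycode/ch7/dijkstras_algorithm.py | search_lowest_costs
-- ===== SOURCE A (Python) =====
-- def search_lowest_costs(costs_dict, processed_list):  #寻找costs值最低的node 在pocessed列表中的就不再查找 因为已经计算过最短路径
--     low_cost_keys = None
--     low_cost = float('inf')
--     for item in costs_dict:
--         if item not in processed_list:
--             if costs_dict[item] < low_cost:
--                 low_cost = costs_dict[item]
--                 low_cost_keys = item
--     return low_cost_keys
-- ===== SOURCE B (Python) =====
-- def search_lowest_costs(costs_dict, processed_list):
--     candidates = [key for key in costs_dict if key not in processed_list]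
--     candidates.sort(key=lambda key: costs_dict[key])  # stable: ties keep insertion order
--     return candidates[0] if candidates else None
-- ===== Notes on version B (the rewrite author's own statement) =====
-- stated objective: alternative
-- what changed: Replaces the manual running-minimum loop with filter-then-stable-sort-by-cost and taking the head of the sorted candidate list (stability reproduces A's first-wins tie-breaking).
import Mathlib
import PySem

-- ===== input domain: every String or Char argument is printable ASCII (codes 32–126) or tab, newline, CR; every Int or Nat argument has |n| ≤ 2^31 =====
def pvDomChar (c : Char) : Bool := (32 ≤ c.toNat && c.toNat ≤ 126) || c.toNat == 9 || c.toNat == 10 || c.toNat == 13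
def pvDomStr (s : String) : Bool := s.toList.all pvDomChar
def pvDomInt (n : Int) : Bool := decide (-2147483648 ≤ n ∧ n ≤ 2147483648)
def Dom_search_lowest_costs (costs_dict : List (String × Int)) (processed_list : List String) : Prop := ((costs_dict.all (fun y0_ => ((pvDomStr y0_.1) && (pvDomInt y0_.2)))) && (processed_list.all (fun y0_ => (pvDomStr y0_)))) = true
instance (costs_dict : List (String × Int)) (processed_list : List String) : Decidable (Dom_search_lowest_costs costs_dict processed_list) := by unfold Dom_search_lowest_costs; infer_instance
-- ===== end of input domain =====

-- ===== PORT A =====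
-- literal port of A: running minimum over dict keys; float('inf') modelled as `none` in the Option Int cost slot
def search_lowest_costs (costs_dict : List (String × Int)) (processed_list : List String) : Option String :=
  (costs_dict.foldl
    (fun (st : Option String × Option Int) item =>
      if processed_list.contains item.1 then st
      else
        match st.2 with
        | none => (some item.1, some (PySem.Dict.getD (PySem.Dict.mk costs_dict) item.1 0))
        | some low_cost =>
            if PySem.Dict.getD (PySem.Dict.mk costs_dict) item.1 0 < low_cost then
              (some item.1, some (PySem.Dict.getD (PySem.Dict.mk costs_dict) item.1 0))
            else st)
    (none, none)).1

-- ===== PORT B =====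
-- B: filter the candidate keys, stable-sort them by cost, return the head (None if empty)
def search_lowest_costs_alt (costs_dict : List (String × Int)) (processed_list : List String) : Option String :=
  (PySem.List.sorted ((costs_dict.map Prod.fst).filter (fun k => !processed_list.contains k))
    (fun k => PySem.Dict.getD (PySem.Dict.mk costs_dict) k 0) false).head?

-- ===== PRECONDITION & SPEC =====
def Spec_search_lowest_costs (costs_dict : List (String × Int)) (processed_list : List String) (out : Option String) : Prop := out = search_lowest_costs_alt costs_dict processed_list
instance (costs_dict : List (String × Int)) (processed_list : List String) (out : Option String) : Decidable (Spec_search_lowest_costs costs_dict processed_list out) := by unfold Spec_search_lowest_costs; infer_instance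

-- ===== CLAIM (what is proved, stated in full; the proofs are below) =====
def Claim_equal_search_lowest_costs : Prop := ∀ (costs_dict : List (String × Int)) (processed_list : List String), Dom_search_lowest_costs costs_dict processed_list → Spec_search_lowest_costs costs_dict processed_list (search_lowest_costs costs_dict processed_list)

-- ===== LEMMAS AND PROOFS =====

-- the step of A's loop, restricted to an unprocessed key, with the cost lookup abstracted as `key`
def pvStep (key : String → Int) (st : Option String × Option Int) (k : String) : Option String × Option Int :=
  match st.2 with
  | none => (some k, some (key k))
  | some low_cost => if key k < low_cost then (some k, some (key k)) else st

-- head of a stable insertion: the new element wins only on a strictly smaller key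
theorem head_insertBy (key : String → Int) (x : String) (ys : List String) :
    (PySem.List.insertBy (fun a b => decide (key a < key b)) x ys).head? =
      some (match ys with | [] => x | h :: _ => if key x < key h then x else h) := by
  cases ys with
  | nil => simp [PySem.List.insertBy]
  | cons h t =>
      simp only [PySem.List.insertBy]
      by_cases hlt : key x < key h <;> simp [hlt]

-- loop invariant: A's state is exactly (head, key of head) of B's insertion accumulator
theorem loop_eq (key : String → Int) (ks : List String) :
    ∀ acc : List String,
      ks.foldl (pvStep key) (acc.head?, Option.map key acc.head?) =
        ((ks.foldl (fun a x => PySem.List.insertBy (fun a b => decide (key a < key b)) x a) acc).head?,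
          Option.map key (ks.foldl (fun a x => PySem.List.insertBy (fun a b => decide (key a < key b)) x a) acc).head?) := by
  induction ks with
  | nil => intro acc; rfl
  | cons k ks ih =>
      intro acc
      have hstep : pvStep key (acc.head?, Option.map key acc.head?) k =
          ((PySem.List.insertBy (fun a b => decide (key a < key b)) k acc).head?,
            Option.map key (PySem.List.insertBy (fun a b => decide (key a < key b)) k acc).head?) := by
        rw [head_insertBy]
        cases acc with
        | nil => rfl
        | cons h t =>
            simp only [pvStep, List.head?_cons, Option.map_some]
            by_cases hlt : key k < key h <;> simp [hlt]
      simp only [List.foldl_cons, hstep]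
      exact ih (PySem.List.insertBy (fun a b => decide (key a < key b)) k acc)

-- A's full fold over the pairs equals the pvStep fold over the filtered candidate keys
theorem foldA_eq_foldCandidates (costs_dict : List (String × Int)) (processed_list : List String) :
    costs_dict.foldl
      (fun (st : Option String × Option Int) item =>
        if processed_list.contains item.1 then st
        else
          match st.2 with
          | none => (some item.1, some (PySem.Dict.getD (PySem.Dict.mk costs_dict) item.1 0))
          | some low_cost =>
              if PySem.Dict.getD (PySem.Dict.mk costs_dict) item.1 0 < low_cost then
                (some item.1, some (PySem.Dict.getD (PySem.Dict.mk costs_dict) item.1 0))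
              else st)
      (none, none) =
    ((costs_dict.map Prod.fst).filter (fun k => !processed_list.contains k)).foldl
      (pvStep (fun k => PySem.Dict.getD (PySem.Dict.mk costs_dict) k 0)) (none, none) := by
  rw [List.foldl_filter, List.foldl_map]
  congr 1
  funext st item
  by_cases hc : processed_list.contains item.1 <;> simp [pvStep]

-- ===== VERDICT (by name: the statement is the Claim_ definition above) =====
theorem search_lowest_costs_spec : Claim_equal_search_lowest_costs := by
  intro costs_dict processed_list _
  show _ = _
  unfold search_lowest_costs search_lowest_costs_alt
  rw [foldA_eq_foldCandidates]
  rw [PySem.List.sorted_eq_foldl_insertBy]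
  have h := loop_eq (fun k => PySem.Dict.getD (PySem.Dict.mk costs_dict) k 0)
    ((costs_dict.map Prod.fst).filter (fun k => !processed_list.contains k)) []
  simp only [List.head?_nil, Option.map_none] at h
  rw [h]
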